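-- pv_equiv track=rewrite | github.com/ansible-collections/community.crypto | plugins/module_utils/crypto/cryptography_support.py | _dn_escape_value
-- ===== SOURCE A (Python) =====
-- def _dn_escape_value(value):
--     '''
--     Escape Distinguished Name's attribute value.
--     '''
--     value = value.replace(u'\\', u'\\\\')
--     for ch in [u',', u'+', u'<', u'>', u';', u'"']:
--         value = value.replace(ch, u'\\%s' % ch)
--     value = value.replace(u'\0', u'\\00')
--     if value.startswith((u' ', u'#')):
--         value = u'\\%s' % value[0] + value[1:]
--     if value.endswith(u' '):
--         value = value[:-1] + u'\\ '
--     return value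
-- ===== SOURCE B (Python) =====
-- _DN_ESCAPE_TABLE = {ord('\\'): '\\\\', 0: '\\00'}
-- for _c in ',+<>;"':
--     _DN_ESCAPE_TABLE[ord(_c)] = '\\' + _c
--
--
-- def _dn_escape_value(value):
--     '''
--     Escape Distinguished Name's attribute value (single translate pass).
--     '''
--     res = value.translate(_DN_ESCAPE_TABLE)
--     if res[:1] in (' ', '#'):
--         res = '\\' + res
--     if res.endswith(' '):
--         res = res[:-1] + '\\ '
--     return res
-- ===== Notes on version B (the rewrite author's own statement) =====
-- stated objective: idiomatic
-- what changed: The eight sequential .replace passes over the string are replaced by one str.translate call over a precomputed per-code-point escape table (a single pass), with the two boundary conditionals kept after it.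
import Mathlib
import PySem

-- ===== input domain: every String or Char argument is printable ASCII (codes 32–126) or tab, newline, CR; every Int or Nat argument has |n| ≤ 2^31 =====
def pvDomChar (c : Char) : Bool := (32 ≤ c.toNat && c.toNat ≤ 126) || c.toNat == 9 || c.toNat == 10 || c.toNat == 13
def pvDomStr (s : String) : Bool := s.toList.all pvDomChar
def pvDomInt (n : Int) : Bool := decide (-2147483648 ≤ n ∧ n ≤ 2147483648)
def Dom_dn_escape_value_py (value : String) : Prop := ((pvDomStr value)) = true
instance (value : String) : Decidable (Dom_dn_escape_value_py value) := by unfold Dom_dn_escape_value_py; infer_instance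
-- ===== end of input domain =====

-- B replaces A's chain of eight sequential .replace passes by one table-driven pass
-- (str.translate over a per-character escape table), keeping the two boundary guards; objective: idiomatic.


-- ===== PORT A =====
-- A's three replace stages: value.replace('\\','\\\\'); the for-loop over the six
-- special characters (foldl = the loop, each step value.replace(ch, '\\'+ch)); replace('\0','\\00').
def dnChainA (l : List Char) : List Char :=
  PySem.Chars.replace
    ([',', '+', '<', '>', ';', '"'].foldl
      (fun v ch => PySem.Chars.replace v [ch] ['\\', ch])
      (PySem.Chars.replace l ['\\'] ['\\', '\\']))
    ['\x00'] ['\\', '0', '0']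

-- A's first conditional; the 'none' arm of the match is unreachable (startswith a
-- one-char prefix forces the string nonempty; Python never indexes an empty string here)
def dnGuard1A (v : List Char) : List Char :=
  if PySem.Chars.startswith v [' '] || PySem.Chars.startswith v ['#'] then
    match PySem.Chars.pyGet? v 0 with
    | some c => '\\' :: c :: PySem.Chars.slice v (some 1) none   -- '\\%s' % value[0] + value[1:]
    | none => v
  else v

-- A's second conditional
def dnGuard2A (v : List Char) : List Char :=
  if PySem.Chars.endswith v [' '] then
    PySem.Chars.slice v none (some (-1)) ++ ['\\', ' ']          -- value[:-1] + '\\ '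
  else v

def dn_escape_value_py (value : String) : String :=
  String.ofList (dnGuard2A (dnGuard1A (dnChainA value.toList)))

-- ===== PORT B =====
-- B's translate table as a per-code-point function (dict lookup by ord(c), identity if absent)
def dnEscChar (c : Char) : List Char :=
  if c = '\\' then ['\\', '\\']
  else if c = ',' then ['\\', ',']
  else if c = '+' then ['\\', '+']
  else if c = '<' then ['\\', '<']
  else if c = '>' then ['\\', '>']
  else if c = ';' then ['\\', ';']
  else if c = '"' then ['\\', '"']
  else if c = '\x00' then ['\\', '0', '0']
  else [c]

-- B's first conditional: res[:1] in (' ', '#')  →  res = '\\' + res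
def dnGuard1B (r : List Char) : List Char :=
  if PySem.Chars.slice r none (some 1) = [' '] ∨ PySem.Chars.slice r none (some 1) = ['#'] then
    '\\' :: r
  else r

-- B's second conditional: res.endswith(' ')  →  res = res[:-1] + '\\ '
def dnGuard2B (r : List Char) : List Char :=
  if PySem.Chars.endswith r [' '] then
    PySem.Chars.slice r none (some (-1)) ++ ['\\', ' ']
  else r

def dn_escape_value_py_alt (value : String) : String :=
  String.ofList (dnGuard2B (dnGuard1B (value.toList.flatMap dnEscChar)))

-- ===== PRECONDITION & SPEC =====
def Spec_dn_escape_value_py (value : String) (out : String) : Prop := out = dn_escape_value_py_alt value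
instance (value : String) (out : String) : Decidable (Spec_dn_escape_value_py value out) := by unfold Spec_dn_escape_value_py; infer_instance

-- ===== CLAIM (what is proved, stated in full; the proofs are below) =====
def Claim_equal_dn_escape_value_py : Prop := ∀ (value : String), Dom_dn_escape_value_py value → Spec_dn_escape_value_py value (dn_escape_value_py value)

-- ===== LEMMAS AND PROOFS =====

-- replace with a one-character pattern is a character-wise flatMap
theorem replace_go_single (o : Char) (new : List Char) :
    ∀ (fuel : Nat) (l acc : List Char), l.length ≤ fuel →
      PySem.Chars.replace.go [o] new fuel l acc
        = acc.reverse ++ l.flatMap (fun c => if c = o then new else [c]) := by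
  intro fuel
  induction fuel with
  | zero =>
    intro l acc h
    have : l = [] := List.eq_nil_of_length_eq_zero (Nat.le_zero.mp h)
    subst this
    simp [PySem.Chars.replace.go]
  | succ n ih =>
    intro l acc h
    cases l with
    | nil => simp [PySem.Chars.replace.go]
    | cons c t =>
      by_cases hc : c = o
      · subst hc
        have hpre : List.isPrefixOf [c] (c :: t) = true := by
          simp [List.isPrefixOf]
        simp only [PySem.Chars.replace.go, hpre, if_pos]
        rw [show List.drop [c].length (c :: t) = t from rfl]
        rw [ih t (new.reverse ++ acc) (by simpa using Nat.le_of_succ_le_succ h)]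
        simp
      · have hpre : List.isPrefixOf [o] (c :: t) = false := by
          simp [List.isPrefixOf]
          exact fun h' => absurd h'.symm hc
        simp only [PySem.Chars.replace.go, hpre]
        rw [ih t (c :: acc) (by simpa using Nat.le_of_succ_le_succ h)]
        simp [hc]

theorem replace_single (l : List Char) (o : Char) (new : List Char) :
    PySem.Chars.replace l [o] new = l.flatMap (fun c => if c = o then new else [c]) := by
  have h := replace_go_single o new l.length l [] (le_refl _)
  simpa [PySem.Chars.replace] using h

theorem flatMap_flatMap' {α β γ : Type} (l : List α) (f : α → List β) (g : β → List γ) :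
    (l.flatMap f).flatMap g = l.flatMap (fun x => (f x).flatMap g) := by
  induction l with
  | nil => simp
  | cons x xs ih => simp [List.flatMap_cons, ih]

-- the whole replace chain is one pass with the escape table
theorem chainA_eq_flatMap (l : List Char) : dnChainA l = l.flatMap dnEscChar := by
  unfold dnChainA
  simp only [List.foldl_cons, List.foldl_nil, replace_single, flatMap_flatMap']
  congr 1
  funext c
  by_cases h1 : c = '\\'; · subst h1; decide
  by_cases h2 : c = ','; · subst h2; decide
  by_cases h3 : c = '+'; · subst h3; decide
  by_cases h4 : c = '<'; · subst h4; decide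
  by_cases h5 : c = '>'; · subst h5; decide
  by_cases h6 : c = ';'; · subst h6; decide
  by_cases h7 : c = '"'; · subst h7; decide
  by_cases h8 : c = '\x00'; · subst h8; decide
  simp [dnEscChar, h1, h2, h3, h4, h5, h6, h7, h8]

-- A's startswith/index/slice guard equals B's slice guard
theorem guard1_eq (v : List Char) : dnGuard1A v = dnGuard1B v := by
  unfold dnGuard1A dnGuard1B
  cases v with
  | nil => simp [PySem.Chars.startswith, PySem.Chars.slice, PySem.List.slice, List.isPrefixOf]
  | cons c t =>
    have hsl : PySem.Chars.slice (c :: t) none (some 1) = [c] := by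
      have := PySem.List.slice_to_natCast (c :: t) 1
      simpa using this
    have hfrom : PySem.Chars.slice (c :: t) (some 1) none = t := by
      have := PySem.List.slice_from_natCast (c :: t) 1
      simpa using this
    have hsw : ∀ p : Char, PySem.Chars.startswith (c :: t) [p] = (c == p) := by
      intro p
      simp [PySem.Chars.startswith, List.isPrefixOf, Bool.and_comm, eq_comm]
    simp only [hsl, hsw, hfrom, PySem.Chars.pyGet?_eq_listPyGet?, PySem.List.pyGet?_zero_cons]
    by_cases h1 : c = ' '
    · subst h1; simp
    · by_cases h2 : c = '#'
      · subst h2; simp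
      · simp [h1, h2]

-- the trailing-space conditionals are the same code
theorem guard2_eq (v : List Char) : dnGuard2A v = dnGuard2B v := rfl

-- ===== VERDICT (by name: the statement is the Claim_ definition above) =====
theorem dn_escape_value_py_spec : Claim_equal_dn_escape_value_py := by
  intro value _
  unfold Spec_dn_escape_value_py dn_escape_value_py dn_escape_value_py_alt
  rw [chainA_eq_flatMap, guard1_eq, guard2_eq]
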